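-- pv_equiv track=rewrite | github.com/jonghocode/Algorithm | 구현/프로그래머스 택배 상자.py | solution
-- ===== SOURCE A (Python) =====
-- def solution(order):
--     answer = 0
--     idx = 1
--     stack = []
--
--     while idx < len(order)+1:
--         stack.append(idx)
--         while len(stack) and stack[-1] == order[answer]: # main부분이 남아있거나 주문과 똑같다면 빼기
--             answer += 1
--             stack.pop()
--         idx += 1 # 다음 상자
--     return answer
-- ===== SOURCE B (Python) =====
-- def solution(order):
--     n = len(order)
--     served = set()   # boxes already loaded onto the truck
--     m = 0            # largest box taken off the belt so far
--     answer = 0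
--     for x in order:
--         if x > m:
--             if x > n:
--                 break            # box x never arrives
--             m = x                # take boxes m+1..x off the belt; x goes straight to the truck
--         else:
--             # the box on top of the side stack is the largest box <= m not yet served
--             top = m
--             while top > 0 and top in served:
--                 top -= 1
--             if top == 0 or top != x:
--                 break            # side stack empty or wrong box on top
--         served.add(x)
--         answer += 1
--     return answer
-- ===== Notes on version B (the rewrite author's own statement) =====
-- stated objective: alternative
-- what changed: B keeps no stack at all: it tracks the set of already-served boxes and the maximum box taken off the belt, characterising the stack top as the largest not-yet-served box <= that maximum, and counts the longest servable prefix of the targets.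
import Mathlib
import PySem

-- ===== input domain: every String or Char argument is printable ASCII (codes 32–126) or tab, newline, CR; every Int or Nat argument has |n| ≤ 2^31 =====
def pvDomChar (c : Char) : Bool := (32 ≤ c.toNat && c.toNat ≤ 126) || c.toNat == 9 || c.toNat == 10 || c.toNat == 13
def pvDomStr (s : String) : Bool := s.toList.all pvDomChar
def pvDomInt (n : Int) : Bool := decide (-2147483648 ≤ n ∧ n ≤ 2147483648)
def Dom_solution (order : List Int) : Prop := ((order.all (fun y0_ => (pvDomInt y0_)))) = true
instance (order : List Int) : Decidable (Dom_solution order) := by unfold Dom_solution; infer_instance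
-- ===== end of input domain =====

-- B keeps no stack: it tracks the served-box set and the maximum box taken off the belt,
-- characterising the stack top as the largest not-yet-served box <= that maximum (alternative algorithm, similar cost).


-- ===== PORT A =====
-- inner while: pop while the stack is nonempty and its top equals order[answer]
-- (stack is kept head-first: Lean list head = Python stack[-1]).
-- On every reachable state a nonempty stack forces 0 ≤ answer < len(order), so
-- 'pyGet? order a = some t' is exactly Python's 'len(stack) and stack[-1] == order[answer]'.
def pvPopA (order : List Int) : List Int → Int → List Int × Int
  | [], a => ([], a)
  | t :: s, a => if PySem.List.pyGet? order a = some t then pvPopA order s (a + 1) else (t :: s, a)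

-- outer while over idx = 1 .. len(order) (the list range(1, len(order)+1))
def pvLoopA (order : List Int) : List Int → List Int → Int → Int
  | [], _, a => a
  | i :: rest, s, a =>
    let p := pvPopA order (i :: s) a
    pvLoopA order rest p.1 p.2

def solution (order : List Int) : Int :=
  pvLoopA order (PySem.List.pyRange 1 ((order.length : Int) + 1) 1) [] 0

-- ===== PORT B =====
-- inner while: top = m; while top > 0 and top in served: top -= 1
def pvScanTop (served : PySem.Set Int) (top : Int) : Int :=
  if 0 < top ∧ PySem.Set.contains served top then pvScanTop served (top - 1) else top
  termination_by top.toNat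
  decreasing_by omega

-- for x in order, breaking on the first target that cannot be served
def pvLoopB (n : Int) : List Int → PySem.Set Int → Int → Int → Int
  | [], _, _, a => a
  | x :: rest, served, m, a =>
    if x > m then
      if x > n then a
      else pvLoopB n rest (PySem.Set.add served x) x (a + 1)
    else
      let top := pvScanTop served m
      if top = 0 ∨ top ≠ x then a
      else pvLoopB n rest (PySem.Set.add served x) m (a + 1)

def solution_alt (order : List Int) : Int :=
  pvLoopB (order.length : Int) order PySem.Set.empty 0 0

-- ===== PRECONDITION & SPEC =====
def Spec_solution (order : List Int) (out : Int) : Prop := out = solution_alt order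
instance (order : List Int) (out : Int) : Decidable (Spec_solution order out) := by unfold Spec_solution; infer_instance

-- ===== CLAIM (what is proved, stated in full; the proofs are below) =====
def Claim_equal_solution : Prop := ∀ (order : List Int), Dom_solution order → Spec_solution order (solution order)

-- ===== LEMMAS AND PROOFS =====

-- Nat-answer twin of pvPopA (proof-side)
def popN (order : List Int) : List Int → Nat → List Int × Nat
  | [], a => ([], a)
  | t :: s, a => if order[a]? = some t then popN order s (a + 1) else (t :: s, a)

-- Nat-answer twin of pvLoopA (proof-side)
def runA (order : List Int) : List Int → List Int → Nat → Nat
  | [], _, a => a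
  | i :: rest, s, a =>
    let p := popN order (i :: s) a
    runA order rest p.1 p.2

-- reference machine: remaining boxes, stack, answer
def runB (order : List Int) (boxes s : List Int) (a : Nat) : Nat :=
    if ha : a < order.length then
      if s.head? = some order[a] then runB order boxes s.tail (a + 1)
      else
        match boxes with
        | [] => a
        | i :: rest => runB order rest (i :: s) a
    else a
  termination_by boxes.length + (order.length - a)
  decreasing_by
  · omega
  · simp only [List.length_cons]; omega

lemma runB_none (order : List Int) (boxes s : List Int) (a : Nat)
    (h : order[a]? = none) : runB order boxes s a = a := by
  have ha : ¬ a < order.length := by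
    intro hlt
    rw [List.getElem?_eq_getElem hlt] at h
    cases h
  rw [runB.eq_def, dif_neg ha]

lemma runB_popstep (order : List Int) (boxes s : List Int) (a : Nat) (x : Int)
    (h : order[a]? = some x) (hs : s.head? = some x) :
    runB order boxes s a = runB order boxes s.tail (a + 1) := by
  obtain ⟨ha, hv⟩ := List.getElem?_eq_some_iff.mp h
  rw [runB.eq_def, dif_pos ha, if_pos (by rw [hv]; exact hs)]

lemma runB_push (order : List Int) (rest s : List Int) (i : Int) (a : Nat) (x : Int)
    (h : order[a]? = some x) (hs : ¬ s.head? = some x) :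
    runB order (i :: rest) s a = runB order rest (i :: s) a := by
  obtain ⟨ha, hv⟩ := List.getElem?_eq_some_iff.mp h
  rw [runB.eq_def, dif_pos ha, if_neg (by rw [hv]; exact hs)]

lemma runB_stuck (order : List Int) (s : List Int) (a : Nat) (x : Int)
    (h : order[a]? = some x) (hs : ¬ s.head? = some x) :
    runB order [] s a = a := by
  obtain ⟨ha, hv⟩ := List.getElem?_eq_some_iff.mp h
  rw [runB.eq_def, dif_pos ha, if_neg (by rw [hv]; exact hs)]

def Good (order : List Int) (s : List Int) (a : Nat) : Prop :=
  ∀ t, s.head? = some t → order[a]? ≠ some t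

lemma pvPopA_eq_popN (order : List Int) (s : List Int) (a : Nat) :
    pvPopA order s (a : Int) = ((popN order s a).1, ((popN order s a).2 : Int)) := by
  induction s generalizing a with
  | nil => simp [pvPopA, popN]
  | cons t s ih =>
    rw [pvPopA, popN]
    simp only [PySem.List.pyGet?_natCast]
    by_cases h : order[a]? = some t
    · simp only [h]
      have he : ((a : Int) + 1) = ((a + 1 : Nat) : Int) := by push_cast; ring
      rw [he]
      exact ih (a + 1)
    · simp [h]

lemma pvLoopA_eq_runA (order : List Int) (boxes : List Int) :
    ∀ (s : List Int) (a : Nat),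
      pvLoopA order boxes s (a : Int) = ((runA order boxes s a : Nat) : Int) := by
  induction boxes with
  | nil => intro s a; simp [pvLoopA, runA]
  | cons i rest ih =>
    intro s a
    simp only [pvLoopA, runA, pvPopA_eq_popN]
    exact ih _ _

lemma popN_good (order : List Int) (s : List Int) (a : Nat) :
    Good order (popN order s a).1 (popN order s a).2 := by
  induction s generalizing a with
  | nil => intro t ht; simp [popN] at ht
  | cons t s ih =>
    by_cases h : order[a]? = some t
    · rw [show popN order (t :: s) a = popN order s (a + 1) by rw [popN]; simp [h]]
      exact ih (a + 1)
    · rw [show popN order (t :: s) a = (t :: s, a) by rw [popN]; simp [h]]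
      intro u hu
      simp at hu
      subst hu
      exact h

lemma runB_pop (order : List Int) (boxes : List Int) :
    ∀ (s : List Int) (a : Nat),
      runB order boxes s a = runB order boxes (popN order s a).1 (popN order s a).2 := by
  intro s
  induction s with
  | nil => intro a; simp [popN]
  | cons t s ih =>
    intro a
    by_cases h : order[a]? = some t
    · rw [show popN order (t :: s) a = popN order s (a + 1) by rw [popN]; simp [h]]
      rw [← ih (a + 1)]
      exact runB_popstep order boxes (t :: s) a t h rfl
    · rw [show popN order (t :: s) a = (t :: s, a) by rw [popN]; simp [h]]

lemma runA_eq_runB (order : List Int) (boxes : List Int) :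
    ∀ (s : List Int) (a : Nat), Good order s a → runA order boxes s a = runB order boxes s a := by
  induction boxes with
  | nil =>
    intro s a hg
    rw [runA]
    rcases hx : order[a]? with _ | x
    · rw [runB_none order [] s a hx]
    · rw [runB_stuck order s a x hx (fun hs => hg x hs hx)]
  | cons i rest ih =>
    intro s a hg
    rw [runA]
    rw [ih _ _ (popN_good order (i :: s) a)]
    rw [← runB_pop]
    rcases hx : order[a]? with _ | x
    · rw [runB_none order rest (i :: s) a hx, runB_none order (i :: rest) s a hx]
    · rw [runB_push order rest s i a x hx (fun hs => hg x hs hx)]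

-- the list of boxes b, b+1, …, n
def boxList (b n : Nat) : List Int := (List.range' b (n + 1 - b)).map (fun k => Int.ofNat k)

lemma boxList_cons (b n : Nat) (h : b ≤ n) :
    boxList b n = (b : Int) :: boxList (b + 1) n := by
  unfold boxList
  rw [show n + 1 - b = (n - b) + 1 by omega, List.range'_succ]
  simp [show n + 1 - (b + 1) = n - b by omega]

lemma boxList_nil (b n : Nat) (h : n < b) : boxList b n = [] := by
  unfold boxList
  simp [show n + 1 - b = 0 by omega]

lemma mem_boxList (b n : Nat) (y : Int) (h : y ∈ boxList b n) :
    ∃ k : Nat, y = (k : Int) ∧ b ≤ k ∧ k ≤ n := by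
  unfold boxList at h
  rw [List.mem_map] at h
  obtain ⟨k, hk, rfl⟩ := h
  rw [List.mem_range'] at hk
  obtain ⟨i, hi, rfl⟩ := hk
  exact ⟨b + 1 * i, rfl, by omega, by omega⟩

lemma pyRange_eq_boxList (n : Nat) :
    PySem.List.pyRange 1 ((n : Int) + 1) 1 = boxList 1 n := by
  induction n with
  | zero => simp [PySem.List.pyRange_one_eq_nil, boxList_nil]
  | succ m ih =>
    rw [show ((m + 1 : Nat) : Int) + 1 = ((m : Int) + 1) + 1 by push_cast; ring]
    rw [PySem.List.pyRange_one_succ_right (by omega), ih]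
    unfold boxList
    rw [show m + 1 + 1 - 1 = (m + 1 - 1) + 1 by omega, List.range'_concat]
    simp
    omega

-- the stack determined by B's state: boxes 1..M not yet served, largest first
def descList (M : Nat) (served : PySem.Set Int) : List Int :=
  (((List.range' 1 M).map (fun k => Int.ofNat k)).filter (fun y => !(PySem.Set.contains served y))).reverse

lemma descList_zero (served : PySem.Set Int) : descList 0 served = [] := rfl

lemma descList_succ (M : Nat) (served : PySem.Set Int) :
    descList (M + 1) served
      = (if PySem.Set.contains served ((M + 1 : Nat) : Int) then []
         else [((M + 1 : Nat) : Int)]) ++ descList M served := by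
  unfold descList
  rw [List.range'_concat, show 1 + 1 * M = M + 1 by omega]
  rw [List.map_append, List.filter_append, List.reverse_append]
  simp only [List.map_cons, List.map_nil, List.filter_cons, List.filter_nil]
  congr 1
  split <;> split <;> simp_all

lemma mem_descList (M : Nat) (served : PySem.Set Int) (y : Int) (h : y ∈ descList M served) :
    ∃ k : Nat, y = (k : Int) ∧ 1 ≤ k ∧ k ≤ M := by
  unfold descList at h
  rw [List.mem_reverse, List.mem_filter] at h
  obtain ⟨hm, _⟩ := h
  rw [List.mem_map] at hm
  obtain ⟨k, hk, rfl⟩ := hm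
  rw [List.mem_range'] at hk
  obtain ⟨i, hi, rfl⟩ := hk
  exact ⟨1 + 1 * i, rfl, by omega, by omega⟩

lemma descList_nodup (M : Nat) (served : PySem.Set Int) : (descList M served).Nodup := by
  unfold descList
  refine List.nodup_reverse.mpr (List.Nodup.filter _ ?_)
  exact (List.nodup_range').map (fun a b h => by simpa [Int.ofNat_inj] using h)

lemma contains_add (s : PySem.Set Int) (x y : Int) :
    PySem.Set.contains (PySem.Set.add s x) y = (PySem.Set.contains s y || y == x) := by
  by_cases h : y ∈ PySem.Set.add s x
  · have h' := (PySem.Set.mem_add s x y).mp h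
    rw [(PySem.Set.contains_iff _ _).mpr h]
    rcases h' with h' | h'
    · rw [(PySem.Set.contains_iff _ _).mpr h']; rfl
    · simp [h']
  · have h1 : ¬ y ∈ s := fun hy => h ((PySem.Set.mem_add s x y).mpr (Or.inl hy))
    have h2 : y ≠ x := fun hy => h ((PySem.Set.mem_add s x y).mpr (Or.inr hy))
    have c1 : PySem.Set.contains (PySem.Set.add s x) y = false := by
      rw [Bool.eq_false_iff]; intro hc; exact h ((PySem.Set.contains_iff _ _).mp hc)
    have c2 : PySem.Set.contains s y = false := by
      rw [Bool.eq_false_iff]; intro hc; exact h1 ((PySem.Set.contains_iff _ _).mp hc)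
    rw [c1, c2]
    simp [h2]

lemma descList_add (M : Nat) (served : PySem.Set Int) (x : Int) :
    descList M (PySem.Set.add served x) = (descList M served).filter (fun y => !(y == x)) := by
  unfold descList
  rw [← List.filter_reverse, ← List.filter_reverse, List.filter_filter]
  apply List.filter_congr
  intro y _
  rw [contains_add]
  cases PySem.Set.contains served y <;> cases hyx : (y == x) <;> simp

lemma descList_add_pop (M : Nat) (served : PySem.Set Int) (x : Int) (t : List Int)
    (h : descList M served = x :: t) :
    descList M (PySem.Set.add served x) = t := by
  rw [descList_add, h]
  have hnd := descList_nodup M served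
  rw [h] at hnd
  rw [List.filter_cons, if_neg (by simp)]
  apply List.filter_eq_self.mpr
  intro y hy
  have : y ≠ x := by
    intro he; subst he
    exact (List.nodup_cons.mp hnd).1 hy
  simp [this]

lemma descList_add_high (M : Nat) (served : PySem.Set Int) (x : Int)
    (hx : ∀ k : Nat, 1 ≤ k → k ≤ M → ((k : Int) ≠ x)) :
    descList M (PySem.Set.add served x) = descList M served := by
  rw [descList_add]
  apply List.filter_eq_self.mpr
  intro y hy
  obtain ⟨k, rfl, h1, h2⟩ := mem_descList M served y hy
  simp [hx k h1 h2]

-- pvScanTop computes the head of descList (0 when empty)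
lemma scanTop_eq (served : PySem.Set Int) :
    ∀ M : Nat, pvScanTop served ((M : Nat) : Int) = ((descList M served).head?).getD 0 := by
  intro M
  induction M with
  | zero =>
    rw [pvScanTop]
    simp [descList_zero]
  | succ m ih =>
    rw [pvScanTop]
    by_cases h : PySem.Set.contains served ((m + 1 : Nat) : Int)
    · rw [if_pos ⟨by exact_mod_cast Nat.succ_pos m, h⟩]
      rw [show ((m + 1 : Nat) : Int) - 1 = ((m : Nat) : Int) by push_cast; ring]
      rw [ih, descList_succ, if_pos h, List.nil_append]
    · rw [if_neg (by intro hc; exact h hc.2)]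
      rw [descList_succ, if_neg h]
      rfl

-- boxes M+c, …, M+1 (the boxes pushed while climbing to box M+c+1)
def revSeg (M : Nat) : Nat → List Int
  | 0 => []
  | c + 1 => ((M + c + 1 : Nat) : Int) :: revSeg M c

lemma revSeg_succ_left (c M : Nat) :
    revSeg M (c + 1) = revSeg (M + 1) c ++ [((M + 1 : Nat) : Int)] := by
  induction c generalizing M with
  | zero => rfl
  | succ c ih =>
    rw [revSeg, ih]
    rw [show revSeg (M + 1) (c + 1) = ((M + 1 + c + 1 : Nat) : Int) :: revSeg (M + 1) c from rfl]
    simp only [List.cons_append]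
    congr 2
    omega

lemma descList_shift (served : PySem.Set Int) (M : Nat) :
    ∀ d : Nat, (∀ k : Nat, M < k → k ≤ M + d → PySem.Set.contains served ((k : Nat) : Int) = false) →
      descList (M + d) served = revSeg M d ++ descList M served := by
  intro d
  induction d with
  | zero => intro _; rfl
  | succ d ih =>
    intro h
    rw [show M + (d + 1) = (M + d) + 1 by omega, descList_succ]
    rw [if_neg (by rw [show M + d + 1 = M + (d + 1) by omega, h (M + (d + 1)) (by omega) (by omega)]; simp)]
    rw [ih (fun k h1 h2 => h k h1 (by omega))]
    simp [revSeg]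

lemma head_ne_of_bounded (s : List Int) (M : Nat) (x : Int)
    (hs : ∀ y ∈ s, ∃ k : Nat, y = (k : Int) ∧ k ≤ M) (hx : (M : Int) < x) :
    ¬ s.head? = some x := by
  intro h
  have hmem : x ∈ s := by
    cases s with
    | nil => cases h
    | cons a t => simp at h; subst h; exact List.mem_cons_self
  obtain ⟨k, rfl, hk⟩ := hs x hmem
  omega

lemma runB_flush (order : List Int) (x : Int) :
    ∀ (boxes s : List Int) (a : Nat), order[a]? = some x →
      (∀ b ∈ boxes, b ≠ x) → ¬ s.head? = some x →
      runB order boxes s a = a := by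
  intro boxes
  induction boxes with
  | nil => intro s a h _ hs; exact runB_stuck order s a x h hs
  | cons i rest ih =>
    intro s a h hb hs
    rw [runB_push order rest s i a x h hs]
    apply ih (i :: s) a h (fun b hbm => hb b (List.mem_cons_of_mem i hbm))
    simp only [List.head?_cons]
    intro hc
    exact hb i List.mem_cons_self (by injection hc)

lemma climb (order : List Int) (x : Int) :
    ∀ (c M : Nat) (s : List Int) (a : Nat),
      x = ((M + c + 1 : Nat) : Int) → order[a]? = some x → M + c + 1 ≤ order.length →
      (∀ y ∈ s, ∃ k : Nat, y = (k : Int) ∧ k ≤ M) →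
      runB order (boxList (M + 1) order.length) s a
        = runB order (boxList (M + c + 2) order.length) (revSeg M c ++ s) (a + 1) := by
  intro c
  induction c with
  | zero =>
    intro M s a hx h hn hs
    rw [boxList_cons (M + 1) order.length (by omega)]
    rw [runB_push order _ s _ a x h (head_ne_of_bounded s M x hs (by rw [hx]; push_cast; omega))]
    have : (((M + 1 : Nat) : Int) :: s).head? = some x := by rw [hx]; simp
    rw [runB_popstep order _ _ a x h this]
    simp [revSeg]
  | succ c ih =>
    intro M s a hx h hn hs
    rw [boxList_cons (M + 1) order.length (by omega)]
    rw [runB_push order _ s _ a x h (head_ne_of_bounded s M x hs (by rw [hx]; push_cast; omega))]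
    have hs' : ∀ y ∈ (((M + 1 : Nat) : Int) :: s), ∃ k : Nat, y = (k : Int) ∧ k ≤ M + 1 := by
      intro y hy
      rcases List.mem_cons.mp hy with hy | hy
      · exact ⟨M + 1, hy, le_refl _⟩
      · obtain ⟨k, rfl, hk⟩ := hs y hy
        exact ⟨k, rfl, by omega⟩
    have := ih (M + 1) (((M + 1 : Nat) : Int) :: s) a
      (by rw [hx]; congr 1; omega) h (by omega) hs'
    rw [this, revSeg_succ_left]
    rw [show M + 1 + c + 2 = M + (c + 1) + 2 by omega]
    simp

-- elements of descList are bounded by M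
lemma descList_bounded (M : Nat) (served : PySem.Set Int) :
    ∀ y ∈ descList M served, ∃ k : Nat, y = (k : Int) ∧ k ≤ M := by
  intro y hy
  obtain ⟨k, rfl, _, h2⟩ := mem_descList M served y hy
  exact ⟨k, rfl, h2⟩

-- main invariant: B's loop equals the reference machine
lemma pvLoopB_eq_runB (order : List Int) :
    ∀ (ts : List Int) (served : PySem.Set Int) (M : Nat) (a : Nat),
      ts = order.drop a → M ≤ order.length →
      (∀ y ∈ served, ∃ k : Nat, y = (k : Int) ∧ 1 ≤ k ∧ k ≤ M) →
      pvLoopB (order.length : Int) ts served ((M : Nat) : Int) ((a : Nat) : Int)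
        = ((runB order (boxList (M + 1) order.length) (descList M served) a : Nat) : Int) := by
  intro ts
  induction ts with
  | nil =>
    intro served M a hts _ _
    have hx : order[a]? = none := by
      rw [← List.head?_drop, ← hts]; rfl
    rw [pvLoopB, runB_none order _ _ a hx]
  | cons x rest ih =>
    intro served M a hts hM hserved
    have hx : order[a]? = some x := by
      rw [← List.head?_drop, ← hts]; rfl
    have hrest : rest = order.drop (a + 1) := by
      have := congrArg List.tail hts
      simpa [List.tail_drop] using this
    rw [pvLoopB]
    by_cases hxm : x > ((M : Nat) : Int)
    · rw [if_pos hxm]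
      by_cases hxn : x > ((order.length : Nat) : Int)
      · -- box x never arrives: both stop at a
        rw [if_pos hxn]
        rw [runB_flush order x _ _ a hx
          (fun b hb => by obtain ⟨k, rfl, _, h2⟩ := mem_boxList _ _ b hb; intro he; omega)
          (head_ne_of_bounded _ M x (descList_bounded M served) hxm)]
      · rw [if_neg hxn]
        -- x = X with M < X ≤ n; climb to it
        have hx0 : 0 ≤ x := le_trans (Int.natCast_nonneg M) (le_of_lt hxm)
        set X := x.toNat with hX
        have hxX : x = ((X : Nat) : Int) := by omega
        have hMX : M < X := by omega
        have hXn : X ≤ order.length := by omega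
        obtain ⟨c, hc⟩ : ∃ c : Nat, X = M + c + 1 := ⟨X - M - 1, by omega⟩
        have hclimb := climb order x c M (descList M served) a
          (by rw [hxX, hc]) hx (by omega) (descList_bounded M served)
        have hfree : ∀ k : Nat, M < k → k ≤ M + c → PySem.Set.contains (PySem.Set.add served x) ((k : Nat) : Int) = false := by
          intro k h1k h2k
          rw [contains_add]
          have hk1 : PySem.Set.contains served ((k : Nat) : Int) = false := by
            rw [Bool.eq_false_iff]
            intro hcc
            have : ((k : Nat) : Int) ∈ served := (PySem.Set.contains_iff _ _).mp hcc
            obtain ⟨j, hj, _, hjM⟩ := hserved _ this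
            have : k = j := by exact_mod_cast hj
            omega
          rw [hk1]
          simp only [Bool.false_or, beq_eq_false_iff_ne, ne_eq]
          rw [hxX]
          intro he
          have : k = X := by exact_mod_cast he
          omega
        have hhigh : ∀ k : Nat, 1 ≤ k → k ≤ M → ((k : Int) ≠ x) := by
          intro k hk1 hk2
          rw [hxX]
          intro he
          have : k = X := by exact_mod_cast he
          omega
        have h1 : descList X (PySem.Set.add served x) = descList (M + c) (PySem.Set.add served x) := by
          rw [hc, descList_succ]
          rw [if_pos (by rw [contains_add, show ((M + c + 1 : Nat) : Int) = x from by rw [hxX, hc]]; simp)]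
          rfl
        have hseg : revSeg M c ++ descList M served
            = descList X (PySem.Set.add served x) := by
          rw [h1, descList_shift (PySem.Set.add served x) M c hfree,
            descList_add_high M served x hhigh]
        have hcast1 : ((a : Nat) : Int) + 1 = ((a + 1 : Nat) : Int) := by push_cast; ring
        rw [hclimb, hseg, hxX, hcast1, show M + c + 2 = X + 1 by omega]
        exact ih (PySem.Set.add served ((X : Nat) : Int)) X (a + 1) hrest hXn
          (fun y hy => by
            rcases (PySem.Set.mem_add _ _ _).mp hy with hy | hy
            · obtain ⟨k, rfl, h1, h2⟩ := hserved y hy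
              exact ⟨k, rfl, h1, by omega⟩
            · exact ⟨X, hy, by omega, le_refl _⟩)
    · rw [if_neg hxm]
      rw [show pvScanTop served ((M : Nat) : Int) = ((descList M served).head?).getD 0 from scanTop_eq served M]
      by_cases hcond : ((descList M served).head?).getD 0 = 0 ∨ ((descList M served).head?).getD 0 ≠ x
      · rw [if_pos hcond]
        -- top empty or wrong: reference machine gets stuck too
        have hne : ¬ (descList M served).head? = some x := by
          cases hd : (descList M served).head? with
          | none => simp
          | some y =>
            intro hc
            have hyx : y = x := by injection hc
            rw [hd] at hcond
            simp only [Option.getD_some] at hcond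
            rcases hcond with h0 | hne
            · -- y = 0 impossible: descList elements are ≥ 1
              have hy : y ∈ descList M served := by
                cases hdl : descList M served with
                | nil => rw [hdl] at hd; cases hd
                | cons z t => rw [hdl] at hd; simp at hd; subst hd; exact List.mem_cons_self
              obtain ⟨k, rfl, hk1, _⟩ := mem_descList M served y hy
              omega
            · exact hne hyx
        rw [runB_flush order x _ _ a hx
          (fun b hb => by
            obtain ⟨k, rfl, h1, _⟩ := mem_boxList _ _ b hb
            intro he; subst he
            omega)
          hne]
      · rw [if_neg hcond]
        push Not at hcond
        obtain ⟨htop0, htopx⟩ := hcond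
        -- top = x and nonzero: descList = x :: t
        have hd : ∃ t, descList M served = x :: t := by
          cases hdl : descList M served with
          | nil => rw [hdl] at htop0; simp at htop0
          | cons z t =>
            rw [hdl] at htopx
            simp only [List.head?_cons, Option.getD_some] at htopx
            exact ⟨t, by rw [htopx]⟩
        obtain ⟨t, ht⟩ := hd
        rw [runB_popstep order _ _ a x hx (by rw [ht]; rfl)]
        have hxmem : x ∈ descList M served := by rw [ht]; exact List.mem_cons_self
        obtain ⟨k, hxk, hk1, hk2⟩ := mem_descList M served x hxmem
        have hcast1 : ((a : Nat) : Int) + 1 = ((a + 1 : Nat) : Int) := by push_cast; ring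
        rw [hcast1]
        rw [ih (PySem.Set.add served x) M (a + 1) hrest hM
          (fun y hy => by
            rcases (PySem.Set.mem_add _ _ _).mp hy with hy | hy
            · exact hserved y hy
            · exact ⟨k, by rw [hy, hxk], hk1, hk2⟩)]
        rw [descList_add_pop M served x t ht]
        rw [ht]
        rfl

-- ===== VERDICT (by name: the statement is the Claim_ definition above) =====
theorem solution_spec : Claim_equal_solution := by
  intro order _
  unfold Spec_solution solution solution_alt
  rw [pyRange_eq_boxList order.length]
  have h1 : pvLoopA order (boxList 1 order.length) [] 0
      = ((runA order (boxList 1 order.length) [] 0 : Nat) : Int) := by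
    simpa using pvLoopA_eq_runA order (boxList 1 order.length) [] 0
  have h2 : pvLoopB (order.length : Int) order PySem.Set.empty 0 0
      = ((runB order (boxList 1 order.length) [] 0 : Nat) : Int) := by
    have := pvLoopB_eq_runB order order PySem.Set.empty 0 0 (by simp) (by omega)
      (by intro y hy; cases hy)
    simpa [descList_zero] using this
  rw [h1, h2, runA_eq_runB order (boxList 1 order.length) [] 0 (by intro t ht; simp at ht)]
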